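-- pv_equiv track=rewrite | github.com/muhai-project/okg_media_discourse | src/paths/collapse.py | select_representative_pred
-- ===== SOURCE A (Python) =====
-- def select_representative_pred(preds):
--     """ Given a list of predicates, choose one representative
--     - Favouring dbo over others, like dbp (prefixes)
--     - Checking frequency in DBpedia, taking the one with lower frequency
--
--     Element in `pred`: (pred_uri, # of times in dataset)"""
--     dbo_paths, other_paths = [], []
--     for (uri, count) in preds:
--         if uri.startswith("http://dbpedia.org/ontology/"):
--             dbo_paths.append((uri, count))
--         else:
--             other_paths.append((uri, count))
--
--     return sorted(dbo_paths, key=lambda x: x[1], reverse=False) + \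
--         sorted(other_paths, key=lambda x: x[1], reverse=False)
-- ===== SOURCE B (Python) =====
-- def select_representative_pred(preds):
--     """Single stable sort with a composite (group, count) key instead of
--     partition + two sorts + concatenation."""
--     return sorted(
--         preds,
--         key=lambda x: (0 if x[0].startswith("http://dbpedia.org/ontology/") else 1, x[1]),
--     )
-- ===== Notes on version B (the rewrite author's own statement) =====
-- stated objective: simpler
-- what changed: Replaced the explicit partition loop plus two separate stable sorts and a concatenation with one stable sort over a composite (group, count) key, relying on sort stability for identical tie order.
import Mathlib
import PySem

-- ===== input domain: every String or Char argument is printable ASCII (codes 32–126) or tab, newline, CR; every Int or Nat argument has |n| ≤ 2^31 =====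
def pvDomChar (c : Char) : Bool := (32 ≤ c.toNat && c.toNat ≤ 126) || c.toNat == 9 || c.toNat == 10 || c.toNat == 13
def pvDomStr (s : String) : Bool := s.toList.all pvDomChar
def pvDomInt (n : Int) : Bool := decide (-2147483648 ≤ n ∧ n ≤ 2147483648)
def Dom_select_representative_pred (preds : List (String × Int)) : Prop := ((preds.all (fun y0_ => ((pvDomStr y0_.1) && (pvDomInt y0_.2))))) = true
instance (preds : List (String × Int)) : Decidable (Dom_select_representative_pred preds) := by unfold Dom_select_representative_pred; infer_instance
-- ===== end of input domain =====

-- B replaces A's partition loop + two stable sorts + concatenation by ONE stable sort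
-- with a composite (group, count) key; objective: simpler.

-- ===== PORT A =====
-- literal port: for-loop partition into (dbo_paths, other_paths), then sorted each by x[1] and concatenate
def select_representative_pred (preds : List (String × Int)) : List (String × Int) :=
  let pair := preds.foldl
    (fun (acc : List (String × Int) × List (String × Int)) x =>
      if PySem.Str.startswith x.1 "http://dbpedia.org/ontology/" then
        (acc.1 ++ [x], acc.2)
      else
        (acc.1, acc.2 ++ [x]))
    ([], [])
  PySem.List.sorted pair.1 (fun x => x.2) false ++ PySem.List.sorted pair.2 (fun x => x.2) false

-- ===== PORT B =====
-- literal port of Source B: sorted(preds, key=lambda x: (0 if x[0].startswith(...) else 1, x[1]))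
def select_representative_pred_alt (preds : List (String × Int)) : List (String × Int) :=
  PySem.List.sorted2 preds
    (fun x => if PySem.Str.startswith x.1 "http://dbpedia.org/ontology/" then (0 : Int) else 1)
    (fun x => x.2) false

-- ===== PRECONDITION & SPEC =====
def Spec_select_representative_pred (preds : List (String × Int)) (out : List (String × Int)) : Prop := out = select_representative_pred_alt preds
instance (preds : List (String × Int)) (out : List (String × Int)) : Decidable (Spec_select_representative_pred preds out) := by unfold Spec_select_representative_pred; infer_instance

-- ===== CLAIM (what is proved, stated in full; the proofs are below) =====
def Claim_equal_select_representative_pred : Prop := ∀ (preds : List (String × Int)), Dom_select_representative_pred preds → Spec_select_representative_pred preds (select_representative_pred preds)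

-- ===== LEMMAS AND PROOFS =====

theorem pv_insertBy_congr {α : Type} (b1 b2 : α → α → Bool) (x : α) (ys : List α)
    (h : ∀ y ∈ ys, b2 x y = b1 x y) :
    PySem.List.insertBy b2 x ys = PySem.List.insertBy b1 x ys := by
  induction ys with
  | nil => rfl
  | cons y ys ih =>
    simp only [PySem.List.insertBy, h y (List.mem_cons_self ..)]
    split_ifs with hb
    · rfl
    · simp only [List.cons.injEq, true_and]
      exact ih (fun z hz => h z (List.mem_cons_of_mem _ hz))

theorem pv_insertBy_append_left {α : Type} (b1 b2 : α → α → Bool) (x : α) (A B : List α)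
    (hA : ∀ a ∈ A, b2 x a = b1 x a) (hB : ∀ b ∈ B, b2 x b = true) :
    PySem.List.insertBy b2 x (A ++ B) = PySem.List.insertBy b1 x A ++ B := by
  induction A with
  | nil =>
    cases B with
    | nil => rfl
    | cons b bs => simp [PySem.List.insertBy, hB b (List.mem_cons_self ..)]
  | cons a as ih =>
    have ha := hA a (List.mem_cons_self ..)
    simp only [List.cons_append, PySem.List.insertBy, ha]
    split_ifs with hb
    · rfl
    · simp only [List.cons_append, List.cons.injEq, true_and]
      exact ih (fun z hz => hA z (List.mem_cons_of_mem _ hz))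

theorem pv_insertBy_append_right {α : Type} (b2 : α → α → Bool) (x : α) (A B : List α)
    (hA : ∀ a ∈ A, b2 x a = false) :
    PySem.List.insertBy b2 x (A ++ B) = A ++ PySem.List.insertBy b2 x B := by
  induction A with
  | nil => rfl
  | cons a as ih =>
    have ha := hA a (List.mem_cons_self ..)
    simp only [List.cons_append, PySem.List.insertBy, ha]
    simp only [Bool.false_eq_true, if_false, List.cons.injEq, true_and]
    exact ih (fun z hz => hA z (List.mem_cons_of_mem _ hz))

-- membership in a stable sort of a filter gives the filter's predicate
theorem pv_mem_sorted_filter {α : Type} (q : α → Bool) (k2 : α → Int) (xs : List α)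
    (a : α) (ha : a ∈ PySem.List.sorted (xs.filter q) k2 false) : q a = true := by
  have ha' : a ∈ xs.filter q :=
    (PySem.List.mem_sorted (xs := xs.filter q) (key := k2) (rev := false) (x := a)).mp ha
  exact (List.mem_filter.mp ha').2

-- A stable sort by the composite (0/1 group, count) key is the stable sort of the
-- first group followed by the stable sort of the second.
theorem pv_sorted2_split {α : Type} (p : α → Bool) (k2 : α → Int) (xs : List α) :
    PySem.List.sorted2 xs (fun x => if p x then (0 : Int) else 1) k2 false
      = PySem.List.sorted (xs.filter p) k2 false
        ++ PySem.List.sorted (xs.filter (fun x => !p x)) k2 false := by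
  induction xs using List.reverseRecOn with
  | nil => rfl
  | append_singleton xs x ih =>
    simp only [PySem.List.sorted2, PySem.List.sorted, if_neg (Bool.false_ne_true),
      List.foldl_append, List.foldl_cons, List.foldl_nil, List.filter_append,
      List.filter_cons, List.filter_nil] at ih ⊢
    by_cases hp : p x = true
    · simp only [hp, Bool.not_true, if_true, Bool.false_eq_true, if_false, ih]
      refine pv_insertBy_append_left _ _ x _ _ ?_ ?_
      · intro a ha
        have hq : p a = true := pv_mem_sorted_filter p k2 xs a (by simpa [PySem.List.sorted] using ha)
        simp [hp, hq]
      · intro b hb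
        have hq : p b = false := by
          simpa using pv_mem_sorted_filter (fun x => !p x) k2 xs b (by simpa [PySem.List.sorted] using hb)
        simp [hp, hq]
    · replace hp : p x = false := by simpa using hp
      simp only [hp, Bool.not_false, if_true, Bool.false_eq_true, if_false, ih]
      rw [pv_insertBy_append_right]
      · congr 1
        refine pv_insertBy_congr _ _ x _ ?_
        intro b hb
        have hq : p b = false := by
          simpa using pv_mem_sorted_filter (fun x => !p x) k2 xs b (by simpa [PySem.List.sorted] using hb)
        simp [hp, hq]
      · intro a ha
        have hq : p a = true := pv_mem_sorted_filter p k2 xs a (by simpa [PySem.List.sorted] using ha)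
        simp [hp, hq]

-- A's partition loop over an accumulator pair computes the two filters.
theorem pv_foldl_partition {α : Type} (p : α → Bool) (xs : List α)
    (A B : List α) :
    xs.foldl (fun (acc : List α × List α) x =>
        if p x then (acc.1 ++ [x], acc.2) else (acc.1, acc.2 ++ [x])) (A, B)
      = (A ++ xs.filter p, B ++ xs.filter (fun x => !p x)) := by
  induction xs generalizing A B with
  | nil => simp
  | cons x xs ih =>
    by_cases hp : p x = true
    · simp [hp, ih]
    · replace hp : p x = false := by simpa using hp
      simp [hp, ih]

-- ===== VERDICT (by name: the statement is the Claim_ definition above) =====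
theorem select_representative_pred_spec : Claim_equal_select_representative_pred := by
  intro preds _
  unfold Spec_select_representative_pred select_representative_pred select_representative_pred_alt
  rw [pv_foldl_partition, pv_sorted2_split]
  simp
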